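-- pv_equiv track=rewrite | github.com/STAN-65031/-DZ-for-the-6th-seminar | task3.py | forms_dictionary
-- ===== SOURCE A (Python) =====
-- def forms_dictionary(names):
--     dictionary = {}
--     for name in names:
--         if name[0] not in dictionary:
--             dictionary[name[0]] = [name]
--         if name not in dictionary[name[0]]:
--             dictionary[name[0]] += [name]
--     return dictionary
-- ===== SOURCE B (Python) =====
-- def forms_dictionary(names):
--     # Pass 1: first characters in order of first appearance.
--     keys = []
--     for name in names:
--         if name[0] not in keys:
--             keys.append(name[0])
--     # Pass 2: for each key, gather its deduped names by scanning the input.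
--     d = {}
--     for k in keys:
--         group = []
--         for name in names:
--             if name[0] == k and name not in group:
--                 group.append(name)
--         d[k] = group
--     return d
-- ===== Notes on version B (the rewrite author's own statement) =====
-- stated objective: alternative
-- what changed: Replaces A's single interleaved pass maintaining a growing dict with a key-major two-phase algorithm: first collect the distinct first characters in order of appearance, then for each key re-scan the input to build its deduped group, inserting each finished group once (no dict membership tests or in-place dict updates).
import Mathlib
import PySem

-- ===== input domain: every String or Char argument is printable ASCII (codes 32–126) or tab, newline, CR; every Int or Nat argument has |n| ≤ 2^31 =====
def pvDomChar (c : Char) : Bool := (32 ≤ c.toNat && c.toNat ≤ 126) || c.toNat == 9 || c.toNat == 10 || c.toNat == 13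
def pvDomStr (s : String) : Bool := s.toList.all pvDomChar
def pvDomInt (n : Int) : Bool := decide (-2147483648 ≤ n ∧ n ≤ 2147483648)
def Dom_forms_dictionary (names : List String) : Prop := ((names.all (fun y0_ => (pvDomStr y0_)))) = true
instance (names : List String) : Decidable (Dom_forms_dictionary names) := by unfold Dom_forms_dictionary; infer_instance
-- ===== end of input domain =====

-- B replaces A's single interleaved dict-building pass by a key-major two-phase algorithm:
-- collect the distinct first characters, then build each key's deduped group by re-scanning
-- the input, inserting every finished group once (objective: alternative).


-- name[0] as a one-character string (exact on nonempty names; Pre_ excludes "")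
def pvFirst (name : String) : String := String.ofList (name.toList.take 1)

-- ===== PORT A =====
def fdStepA (d : PySem.Dict String (List String)) (name : String) : PySem.Dict String (List String) :=
  let k := pvFirst name
  let d1 := if d.contains k then d else d.insert k [name]
  let cur := d1.getD k []
  if name ∈ cur then d1 else d1.insert k (cur ++ [name])

def forms_dictionary (names : List String) : List (String × List String) :=
  (names.foldl fdStepA PySem.Dict.empty).items

-- ===== PORT B =====
-- pass 1: the distinct first characters, in order of first appearance
def fdKeys (names : List String) : List String :=
  names.foldl (fun ks n => if pvFirst n ∈ ks then ks else ks ++ [pvFirst n]) []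

-- pass 2 inner loop: the deduped group of the names whose first character is k
def fdGroup (names : List String) (k : String) : List String :=
  names.foldl (fun g n => if pvFirst n = k ∧ n ∉ g then g ++ [n] else g) []

def forms_dictionary_alt (names : List String) : List (String × List String) :=
  ((fdKeys names).foldl (fun d k => d.insert k (fdGroup names k)) PySem.Dict.empty).items

-- ===== PRECONDITION & SPEC =====
-- Pre_ excludes empty-string names, on which the Python A raises IndexError (name[0]).
def Pre_forms_dictionary (names : List String) : Prop := ∀ n ∈ names, n ≠ ""
instance (names : List String) : Decidable (Pre_forms_dictionary names) := by unfold Pre_forms_dictionary; infer_instance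
def pvWitness_forms_dictionary : List String := ["ann", "bob", "ann", "alex"]

def Spec_forms_dictionary (names : List String) (out : List (String × List String)) : Prop := out = forms_dictionary_alt names
instance (names : List String) (out : List (String × List String)) : Decidable (Spec_forms_dictionary names out) := by unfold Spec_forms_dictionary; infer_instance

-- ===== CLAIM (what is proved, stated in full; the proofs are below) =====
def Claim_equal_forms_dictionary : Prop := ∀ (names : List String), Dom_forms_dictionary names → Pre_forms_dictionary names → Spec_forms_dictionary names (forms_dictionary names)

-- ===== LEMMAS AND PROOFS =====

lemma fdKeys_eq_ofList (p : List String) : fdKeys p = PySem.Set.ofList (p.map pvFirst) := by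
  rw [← PySem.Set.update_nil_left, PySem.Set.update_map_eq_foldl_add]
  simp only [fdKeys, PySem.Set.add_eq_ite]

lemma mem_fdKeys {k : String} {p : List String} : k ∈ fdKeys p ↔ k ∈ p.map pvFirst := by
  simp [fdKeys_eq_ofList, PySem.Set.mem_ofList]

lemma nodup_fdKeys (p : List String) : (fdKeys p).Nodup := by
  rw [fdKeys_eq_ofList]; exact PySem.Set.nodup_ofList _

lemma fdKeys_snoc (p : List String) (n : String) :
    fdKeys (p ++ [n]) = if pvFirst n ∈ fdKeys p then fdKeys p else fdKeys p ++ [pvFirst n] := by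
  simp only [fdKeys, List.foldl_append, List.foldl_cons, List.foldl_nil]

lemma fdGroup_snoc (p : List String) (n k : String) :
    fdGroup (p ++ [n]) k =
      if pvFirst n = k ∧ n ∉ fdGroup p k then fdGroup p k ++ [n] else fdGroup p k := by
  simp only [fdGroup, List.foldl_append, List.foldl_cons, List.foldl_nil]

lemma fdGroup_nil_of_no_key (p : List String) (k : String) (h : ∀ m ∈ p, pvFirst m ≠ k) :
    fdGroup p k = [] := by
  induction p using List.reverseRecOn with
  | nil => rfl
  | append_singleton p n ih =>
    simp only [fdGroup, List.foldl_append, List.foldl_cons, List.foldl_nil] at *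
    rw [ih (fun m hm => h m (by simp [hm]))]
    simp [h n (by simp)]

lemma stepA_old (d : PySem.Dict String (List String)) (n : String) (G : List String)
    (hcont : d.contains (pvFirst n) = true) (hG : d.getD (pvFirst n) [] = G) (hin : n ∈ G) :
    fdStepA d n = d := by
  simp [fdStepA, hcont, hG, hin]

lemma stepA_grow (d : PySem.Dict String (List String)) (n : String) (G : List String)
    (hcont : d.contains (pvFirst n) = true) (hG : d.getD (pvFirst n) [] = G) (hin : n ∉ G) :
    fdStepA d n = d.insert (pvFirst n) (G ++ [n]) := by
  simp [fdStepA, hcont, hG, hin]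

lemma stepA_fresh (d : PySem.Dict String (List String)) (n : String)
    (hcont : d.contains (pvFirst n) = false) :
    fdStepA d n = d.insert (pvFirst n) [n] := by
  simp [fdStepA, hcont, PySem.Dict.getD_insert_self]

lemma keys_A (p : List String)
    (h : (p.foldl fdStepA PySem.Dict.empty).items = (fdKeys p).map (fun k => (k, fdGroup p k))) :
    (p.foldl fdStepA PySem.Dict.empty).keys = fdKeys p := by
  simp only [PySem.Dict.keys, h, List.map_map]
  exact (List.map_congr_left fun j _ => rfl).trans (List.map_id _)

lemma A_items (p : List String) :
    (p.foldl fdStepA PySem.Dict.empty).items = (fdKeys p).map (fun k => (k, fdGroup p k)) := by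
  induction p using List.reverseRecOn with
  | nil => rfl
  | append_singleton p n ih =>
    have hkeys := keys_A p ih
    have hnodup : (p.foldl fdStepA PySem.Dict.empty).keys.Nodup := hkeys ▸ nodup_fdKeys p
    rw [List.foldl_append, List.foldl_cons, List.foldl_nil, fdKeys_snoc]
    by_cases hk : pvFirst n ∈ fdKeys p
    · have hcont : (p.foldl fdStepA PySem.Dict.empty).contains (pvFirst n) = true := by
        rw [PySem.Dict.contains_eq_decide_mem_keys, hkeys]; simpa using hk
      have hgetD : (p.foldl fdStepA PySem.Dict.empty).getD (pvFirst n) [] = fdGroup p (pvFirst n) := by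
        have hmem : (pvFirst n, fdGroup p (pvFirst n)) ∈ (p.foldl fdStepA PySem.Dict.empty).items := by
          rw [ih]; exact List.mem_map_of_mem hk
        exact PySem.Dict.getD_of_mem_items _ hmem hnodup []
      rw [if_pos hk]
      by_cases hin : n ∈ fdGroup p (pvFirst n)
      · rw [stepA_old _ _ _ hcont hgetD hin, ih]
        apply List.map_congr_left
        intro j hj
        rw [fdGroup_snoc]
        by_cases hjk : pvFirst n = j
        · simp [hjk ▸ hin]
        · simp [hjk]
      · rw [stepA_grow _ _ _ hcont hgetD hin, PySem.Dict.items_insert_of_contains _ _ hcont, ih,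
          List.map_map]
        apply List.map_congr_left
        intro j hj
        rw [fdGroup_snoc]
        by_cases hjk : pvFirst n = j
        · subst hjk; simp [hin]
        · have hbeq : (j == pvFirst n) = false := by simpa using fun h => hjk h.symm
          simp [Function.comp, hbeq, hjk]
    · have hcont : (p.foldl fdStepA PySem.Dict.empty).contains (pvFirst n) = false := by
        rw [PySem.Dict.contains_eq_decide_mem_keys, hkeys]; simpa using hk
      have hgrp : fdGroup p (pvFirst n) = [] := by
        apply fdGroup_nil_of_no_key
        intro m hm hmk
        exact hk (mem_fdKeys.mpr (hmk ▸ List.mem_map_of_mem hm))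
      rw [if_neg hk, stepA_fresh _ _ hcont, PySem.Dict.items_insert_of_not_contains _ _ hcont, ih,
        List.map_append]
      congr 1
      · apply List.map_congr_left
        intro j hj
        have hjk : pvFirst n ≠ j := fun h => hk (h ▸ hj)
        rw [fdGroup_snoc]; simp [hjk]
      · simp [fdGroup_snoc, hgrp]

-- ===== VERDICT (by name: the statement is the Claim_ definition above) =====
theorem forms_dictionary_spec : Claim_equal_forms_dictionary := by
  intro names _ _
  unfold Spec_forms_dictionary forms_dictionary forms_dictionary_alt
  rw [A_items, PySem.Dict.items_foldl_insert_fresh (fdKeys names) (fun k => k)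
    (fun k => fdGroup names k) PySem.Dict.empty
    (fun a _ => PySem.Dict.contains_empty a)
    (by simpa using nodup_fdKeys names)]
  rfl
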